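-- pv_equiv track=rewrite | github.com/jennyzzt/LLM_debate_on_ARC | ARC_gen_agents2_rounds2_openai/6c434453/agent0/algo1.py | solve
-- ===== SOURCE A (Python) =====
-- def solve(input_grid):
--     rows, cols = len(input_grid), len(input_grid[0])
--     output_grid = [[cell for cell in row] for row in input_grid]  # Copy input grid to output grid
--
--     # Helper function to check for horizontal or vertical line of three '1's
--     def is_part_of_line(r, c):
--         horizontal = c > 0 and c < cols - 1 and input_grid[r][c-1] == 1 and input_grid[r][c] == 1 and input_grid[r][c+1] == 1
--         vertical = r > 0 and r < rows - 1 and input_grid[r-1][c] == 1 and input_grid[r][c] == 1 and input_grid[r+1][c] == 1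
--         return horizontal or vertical
--
--     # Iterate through each cell in the grid
--     for r in range(rows):
--         for c in range(cols):
--             # If the cell is '1' and part of a line, change it to '2'
--             if input_grid[r][c] == 1 and is_part_of_line(r, c):
--                 output_grid[r][c] = 2
--
--     return output_grid
-- ===== SOURCE B (Python) =====
-- def _run_len(vals):
--     """Length of the leading run of 1s in vals."""
--     n = 0
--     for v in vals:
--         if v != 1:
--             break
--         n += 1
--     return n
--
--
-- def _mark_runs(vals):
--     """Copy of vals with every interior cell of a maximal run of 1s set to 2."""
--     out = []
--     rest = vals
--     while rest:
--         if rest[0] != 1: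
--             out.append(rest[0])
--             rest = rest[1:]
--         else:
--             n = _run_len(rest)
--             if n >= 3:
--                 out.extend([1] + [2] * (n - 2) + [1])
--             else:
--                 out.extend([1] * n)
--             rest = rest[n:]
--     return out
--
--
-- def solve(input_grid):
--     cols = len(input_grid[0])
--     # horizontal pass: mark run interiors row by row
--     out = [_mark_runs(row[:cols]) + row[cols:] for row in input_grid]
--     # vertical pass: mark run interiors column by column
--     for c in range(cols):
--         col_marked = _mark_runs([row[c] for row in input_grid])
--         for r in range(len(input_grid)):
--             if col_marked[r] == 2 and input_grid[r][c] == 1: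
--                 out[r][c] = 2
--     return out
-- ===== Notes on version B (the rewrite author's own statement) =====
-- stated objective: alternative
-- what changed: replaces the per-cell neighbour test with a run-segmentation algorithm: each row and each column is split into maximal runs of consecutive 1s and the interior cells of runs of length >= 3 are marked 2
import Mathlib
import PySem

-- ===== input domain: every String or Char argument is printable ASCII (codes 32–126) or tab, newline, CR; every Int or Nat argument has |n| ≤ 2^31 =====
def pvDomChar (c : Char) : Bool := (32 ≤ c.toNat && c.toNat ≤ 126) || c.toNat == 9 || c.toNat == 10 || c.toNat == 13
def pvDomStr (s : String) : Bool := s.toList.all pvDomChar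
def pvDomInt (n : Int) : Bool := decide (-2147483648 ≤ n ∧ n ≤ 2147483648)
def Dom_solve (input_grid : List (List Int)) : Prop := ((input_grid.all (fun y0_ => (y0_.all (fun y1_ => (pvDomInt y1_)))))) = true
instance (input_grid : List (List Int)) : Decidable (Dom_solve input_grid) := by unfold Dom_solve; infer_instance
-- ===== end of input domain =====

-- B replaces A's per-cell three-neighbour test by a run-segmentation pass over each row and each
-- column (mark interiors of maximal runs of 1s); same return value, no speed claim.

-- shared indexing helper: g[r][c] with default 0 (both ports only read it in range on Pre_ inputs)
def pvCell (g : List (List Int)) (r c : Nat) : Int := (g.getD r []).getD c 0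

-- ===== PORT A =====
-- 'is_part_of_line' of A, literally: guarded three-in-a-row test around (r, c)
def pvIsPartOfLine (input_grid : List (List Int)) (rows cols r c : Nat) : Bool :=
  let horizontal := decide (0 < c) && decide (c < cols - 1) &&
    (pvCell input_grid r (c-1) == 1) && (pvCell input_grid r c == 1) && (pvCell input_grid r (c+1) == 1)
  let vertical := decide (0 < r) && decide (r < rows - 1) &&
    (pvCell input_grid (r-1) c == 1) && (pvCell input_grid r c == 1) && (pvCell input_grid (r+1) c == 1)
  horizontal || vertical

def solve (input_grid : List (List Int)) : List (List Int) :=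
  let rows := input_grid.length
  let cols := (input_grid.headD []).length  -- len(input_grid[0]); Pre_ excludes the empty grid (IndexError)
  let output_grid := input_grid.map (fun row => row.map (fun cell => cell))
  (List.range rows).foldl (fun out r =>
    (List.range cols).foldl (fun out c =>
      if pvCell input_grid r c == 1 && pvIsPartOfLine input_grid rows cols r c then
        out.modify r (fun row => row.set c 2)    -- output_grid[r][c] = 2
      else out) out) output_grid

-- ===== PORT B =====
-- _run_len of Source B: length of the leading run of 1s
def pvRunLen : List Int → Nat
  | [] => 0
  | v :: t => if v == 1 then pvRunLen t + 1 else 0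

-- _mark_runs of Source B: interiors of maximal runs of 1s become 2
def pvMarkRuns : List Int → List Int
  | [] => []
  | v :: t =>
    if v == 1 then
      (if 3 ≤ pvRunLen (v :: t) then
         1 :: (List.replicate (pvRunLen (v :: t) - 2) 2 ++ [1])
       else List.replicate (pvRunLen (v :: t)) 1)
      ++ pvMarkRuns (t.drop (pvRunLen (v :: t) - 1))   -- rest = rest[n:]
    else v :: pvMarkRuns t
termination_by vals => vals.length
decreasing_by
  · simpa using Nat.lt_succ_of_le (Nat.le_trans (List.length_drop ▸ Nat.sub_le _ _) (Nat.le_refl _))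
  · simp

def solve_alt (input_grid : List (List Int)) : List (List Int) :=
  let cols := (input_grid.headD []).length  -- len(input_grid[0]); raises on the empty grid like A
  let out := input_grid.map (fun row => pvMarkRuns (row.take cols) ++ row.drop cols)
  (List.range cols).foldl (fun out c =>
    let colMarked := pvMarkRuns (input_grid.map (fun row => row.getD c 0))
    (List.range input_grid.length).foldl (fun out r =>
      if colMarked.getD r 0 == 2 && pvCell input_grid r c == 1 then
        out.modify r (fun row => row.set c 2)    -- out[r][c] = 2
      else out) out) out

-- ===== PRECONDITION & SPEC =====
-- Pre_: exactly the inputs on which A returns: a nonempty grid (A reads input_grid[0]) all of whose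
-- rows have at least len(input_grid[0]) cells (A reads input_grid[r][c] for every c < that length).
def Pre_solve (input_grid : List (List Int)) : Prop :=
  input_grid ≠ [] ∧ ∀ row ∈ input_grid, (input_grid.headD []).length ≤ row.length
instance (input_grid : List (List Int)) : Decidable (Pre_solve input_grid) := by unfold Pre_solve; infer_instance

def pvWitness_solve : List (List Int) := [[1, 1, 1], [0, 1, 0]]

def Spec_solve (input_grid : List (List Int)) (out : List (List Int)) : Prop := out = solve_alt input_grid
instance (input_grid : List (List Int)) (out : List (List Int)) : Decidable (Spec_solve input_grid out) := by unfold Spec_solve; infer_instance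

-- ===== CLAIM (what is proved, stated in full; the proofs are below) =====
def Claim_equal_solve : Prop := ∀ (input_grid : List (List Int)), Dom_solve input_grid → Pre_solve input_grid → Spec_solve input_grid (solve input_grid)

-- ===== LEMMAS AND PROOFS =====
def pvTriple (v : List Int) (k : Nat) : Bool :=
  decide (0 < k) && decide (k+1 < v.length) &&
    (v.getD (k-1) 0 == 1) && (v.getD k 0 == 1) && (v.getD (k+1) 0 == 1)

lemma getD_take_lt (l : List Int) {n k : Nat} (d : Int) (h : k < n) : (l.take n).getD k d = l.getD k d := by
  simp [List.getD, h]

lemma getD_drop' (l : List Int) (n k : Nat) (d : Int) : (l.drop n).getD k d = l.getD (n+k) d := by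
  simp [List.getD, List.getElem?_drop]

lemma pvRunLen_le (v : List Int) : pvRunLen v ≤ v.length := by
  induction v with
  | nil => simp [pvRunLen]
  | cons a t ih => simp only [pvRunLen]; split <;> simp <;> omega

lemma pvRunLen_lt (v : List Int) : ∀ {k : Nat}, k < pvRunLen v → v.getD k 0 = 1 := by
  induction v with
  | nil => intro k h; simp [pvRunLen] at h
  | cons a t ih =>
    intro k h
    simp only [pvRunLen] at h
    by_cases ha : a == 1
    · rw [if_pos ha] at h
      cases k with
      | zero => simpa using eq_of_beq ha
      | succ k => simpa using ih (by omega)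
    · rw [if_neg ha] at h; omega

lemma pvRunLen_stop (v : List Int) (h : pvRunLen v < v.length) : v.getD (pvRunLen v) 0 ≠ 1 := by
  induction v with
  | nil => simp [pvRunLen] at h
  | cons a t ih =>
    simp only [pvRunLen] at h ⊢
    by_cases ha : a == 1
    · rw [if_pos ha] at h ⊢
      simpa using ih (by simpa using h)
    · rw [if_neg ha] at h ⊢
      simpa using fun he => ha (by simp [he])

lemma pvMarkRuns_length (v : List Int) : (pvMarkRuns v).length = v.length := by
  fun_induction pvMarkRuns v with
  | case1 => rfl
  | case2 v t hv ih =>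
    have h1 : 1 ≤ pvRunLen (v :: t) := by simp [pvRunLen, hv]
    have h2 : pvRunLen (v :: t) ≤ t.length + 1 := by simpa using pvRunLen_le (v :: t)
    simp only [List.length_append, ih, List.length_drop]
    split <;> simp <;> omega
  | case3 v t hv ih => simp [ih]

lemma pvTriple_iff (v : List Int) (k : Nat) :
    pvTriple v k = true ↔ 0 < k ∧ k+1 < v.length ∧ v.getD (k-1) 0 = 1 ∧ v.getD k 0 = 1 ∧ v.getD (k+1) 0 = 1 := by
  simp [pvTriple, and_assoc]

lemma pvMarkRuns_getD (v : List Int) : ∀ k, (pvMarkRuns v).getD k 0 = if pvTriple v k then 2 else v.getD k 0 := by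
  fun_induction pvMarkRuns v with
  | case1 =>
    intro k
    have : pvTriple [] k = false := by simp [pvTriple]
    simp [this]
  | case2 v t hv ih =>
    intro k
    have hv1 : v = 1 := by simpa using hv
    set w : List Int := v :: t with hw
    set n : Nat := pvRunLen w with hn
    have hn1 : 1 ≤ n := by simp [hn, hw, pvRunLen, hv]
    have hnle : n ≤ w.length := pvRunLen_le w
    have hR2 : ∀ j, j < n → w.getD j 0 = 1 := fun j hj => pvRunLen_lt w hj
    have hR3 : n < w.length → w.getD n 0 ≠ 1 := fun h => pvRunLen_stop w h
    have hdrop : t.drop (n-1) = w.drop n := by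
      conv_rhs => rw [hw, show n = (n-1)+1 from by omega]
      rw [List.drop_succ_cons]
    have hdlen : (t.drop (n-1)).length = w.length - n := by
      rw [hdrop]; simp
    have hdget : ∀ j, (t.drop (n-1)).getD j 0 = w.getD (n + j) 0 := by
      intro j; rw [hdrop, getD_drop']
    have hheadlen : (if 3 ≤ n then (1:Int) :: (List.replicate (n-2) 2 ++ [1]) else List.replicate n 1).length = n := by
      split <;> simp <;> omega
    by_cases hk : k < n
    · -- inside the leading run
      rw [List.getD_append _ _ _ _ (by rw [hheadlen]; exact hk)]
      have hhead : (if 3 ≤ n then (1:Int) :: (List.replicate (n-2) 2 ++ [1]) else List.replicate n 1).getD k 0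
          = if 1 ≤ k ∧ k+1 < n then 2 else 1 := by
        by_cases h3 : 3 ≤ n
        · rw [if_pos h3]
          cases k with
          | zero => simp
          | succ k =>
            rw [List.getD_cons_succ]
            by_cases hk2 : k < n - 2
            · rw [List.getD_append _ _ _ _ (by simpa using hk2), List.getD_replicate _ hk2]
              have : 1 ≤ k+1 ∧ k+1+1 < n := by omega
              rw [if_pos this]
            · rw [List.getD_append_right _ _ _ _ (by simpa using hk2)]
              have hke : k = n - 2 := by omega
              have : k - (List.replicate (n-2) (2:Int)).length = 0 := by simp [hke]
              rw [this]
              have : ¬ (1 ≤ k+1 ∧ k+1+1 < n) := by omega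
              rw [if_neg this]
              rfl
        · rw [if_neg h3, List.getD_replicate _ hk]
          have : ¬ (1 ≤ k ∧ k+1 < n) := by omega
          rw [if_neg this]
      rw [hhead]
      have htrip : pvTriple w k = true ↔ (1 ≤ k ∧ k+1 < n) := by
        rw [pvTriple_iff]
        constructor
        · rintro ⟨h0, hb, hm1, hm, hp1⟩
          refine ⟨h0, ?_⟩
          rcases Nat.lt_or_ge (k+1) n with h | h
          · exact h
          · have : k + 1 = n := by omega
            exact absurd (this ▸ hp1) (hR3 (this ▸ hb))
        · rintro ⟨h1, h2⟩
          exact ⟨h1, by omega, hR2 _ (by omega), hR2 _ (by omega), hR2 _ (by omega)⟩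
      by_cases ht : 1 ≤ k ∧ k+1 < n
      · rw [if_pos ht, if_pos (htrip.mpr ht)]
      · rw [if_neg ht]
        have : pvTriple w k ≠ true := fun h => ht (htrip.mp h)
        rw [if_neg this, hR2 _ hk]
    · -- past the leading run: recurse
      push Not at hk
      rw [List.getD_append_right _ _ _ _ (by rw [hheadlen]; exact hk), hheadlen, ih (k - n)]
      have hrest : (t.drop (n-1)).getD (k-n) 0 = w.getD k 0 := by
        rw [hdget]
        congr 1
        omega
      have htrip : pvTriple (t.drop (n-1)) (k-n) = pvTriple w k := by
        rcases Nat.eq_or_lt_of_le hk with heq | hlt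
        · -- k = n : both false
          have h1 : pvTriple (t.drop (n-1)) (k-n) = false := by
            simp [pvTriple, heq]
          have h2 : pvTriple w k = false := by
            rw [← Bool.not_eq_true, pvTriple_iff]
            rintro ⟨h0, hb, hm1, hm, hp1⟩
            exact hR3 (heq ▸ hb |> fun h => by omega) (heq ▸ hm)
          rw [h1, h2]
        · -- k > n
          have hb : (k-n)+1 < (t.drop (n-1)).length ↔ k+1 < w.length := by
            rw [hdlen]; omega
          rw [Bool.eq_iff_iff, pvTriple_iff, pvTriple_iff, hdget, hdget, hdget, hdlen]
          constructor
          · rintro ⟨h0, hbd, hm1, hm, hp1⟩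
            refine ⟨by omega, by omega, ?_, ?_, ?_⟩
            · rw [show k - 1 = n + (k - n - 1) by omega] at *; exact hm1
            · rw [show k = n + (k - n) by omega]; exact hm
            · rw [show k + 1 = n + ((k - n) + 1) by omega]; exact hp1
          · rintro ⟨h0, hbd, hm1, hm, hp1⟩
            refine ⟨by omega, by omega, ?_, ?_, ?_⟩
            · rw [show n + (k - n - 1) = k - 1 by omega]; exact hm1
            · rw [show n + (k - n) = k by omega]; exact hm
            · rw [show n + ((k - n) + 1) = k + 1 by omega]; exact hp1
      rw [hrest, htrip]
  | case3 v t hv ih =>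
    intro k
    cases k with
    | zero =>
      have : pvTriple (v :: t) 0 = false := by simp [pvTriple]
      simp [this]
    | succ k =>
      rw [List.getD_cons_succ, List.getD_cons_succ, ih k]
      have htrip : pvTriple t k = pvTriple (v :: t) (k+1) := by
        have hvne : v ≠ 1 := by simpa using hv
        cases k with
        | zero =>
          have h1 : pvTriple t 0 = false := by simp [pvTriple]
          have h2 : pvTriple (v :: t) 1 = false := by
            rw [← Bool.not_eq_true, pvTriple_iff]
            rintro ⟨h0, hb, hm1, hm, hp1⟩
            exact hvne (by simpa using hm1)
          rw [h1, h2]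
        | succ k =>
          rw [Bool.eq_iff_iff, pvTriple_iff, pvTriple_iff]
          simp only [List.length_cons, List.getD_cons_succ]
          constructor
          · rintro ⟨h0, hb, hm1, hm, hp1⟩
            refine ⟨by omega, by omega, ?_, hm, hp1⟩
            rw [show k + 1 + 1 - 1 = (k + 1 - 1) + 1 by omega, List.getD_cons_succ]
            exact hm1
          · rintro ⟨h0, hb, hm1, hm, hp1⟩
            refine ⟨by omega, by omega, ?_, hm, hp1⟩
            rw [show k + 1 + 1 - 1 = (k + 1 - 1) + 1 by omega, List.getD_cons_succ] at hm1
            exact hm1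
      rw [htrip]



lemma cell_write (o : List (List Int)) (r' c' r c : Nat) :
    pvCell (o.modify r' (fun row => row.set c' 2)) r c
      = if r' = r ∧ c' = c ∧ c < (o.getD r []).length then 2 else pvCell o r c := by
  simp only [pvCell, List.getD, List.getElem?_modify]
  rcases h : o[r]? with _ | row
  · simp
  · simp only [Option.getD_some]
    by_cases hr : r' = r <;> by_cases hc : c' = c <;> by_cases hlt : c < row.length <;>
      simp_all [List.getElem?_set]

lemma shape_write (o : List (List Int)) (r' c' : Nat) (r : Nat) :
    ((o.modify r' (fun row => row.set c' 2)).getD r []).length = (o.getD r []).length := by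
  simp only [List.getD, List.getElem?_modify]
  rcases h : o[r]? with _ | row <;> simp
  split <;> simp

lemma shape_foldl_writes {ι : Type} (is : List ι) (p : ι → Bool) (ρ γ : ι → Nat)
    (out : List (List Int)) :
    (is.foldl (fun o i => if p i then o.modify (ρ i) (fun row => row.set (γ i) 2) else o) out).length = out.length
    ∧ ∀ r, ((is.foldl (fun o i => if p i then o.modify (ρ i) (fun row => row.set (γ i) 2) else o) out).getD r []).length = (out.getD r []).length := by
  induction is generalizing out with
  | nil => simp
  | cons i is ih =>
    simp only [List.foldl_cons]
    rcases ih (if p i then out.modify (ρ i) (fun row => row.set (γ i) 2) else out) with ⟨h1, h2⟩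
    refine ⟨?_, fun r => ?_⟩
    · rw [h1]; split <;> simp
    · rw [h2]; split
      · exact shape_write _ _ _ _
      · rfl

lemma cell_foldl_writes {ι : Type} (is : List ι) (p : ι → Bool) (ρ γ : ι → Nat)
    (out : List (List Int)) (r c : Nat) :
    pvCell (is.foldl (fun o i => if p i then o.modify (ρ i) (fun row => row.set (γ i) 2) else o) out) r c
      = if (∃ i ∈ is, p i = true ∧ ρ i = r ∧ γ i = c) ∧ c < (out.getD r []).length then 2
        else pvCell out r c := by
  induction is generalizing out with
  | nil => simp
  | cons i is ih =>
    simp only [List.foldl_cons]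
    rw [ih]
    by_cases hp : p i = true
    · simp only [hp, if_pos rfl, if_true]
      rw [shape_write, cell_write]
      by_cases hhead : ρ i = r ∧ γ i = c ∧ c < (out.getD r []).length
      · have hall : (∃ j ∈ i :: is, p j = true ∧ ρ j = r ∧ γ j = c) ∧ c < (out.getD r []).length :=
          ⟨⟨i, by simp, hp, hhead.1, hhead.2.1⟩, hhead.2.2⟩
        rw [if_pos hall]
        by_cases htail : (∃ j ∈ is, p j = true ∧ ρ j = r ∧ γ j = c) ∧ c < (out.getD r []).length
        · rw [if_pos htail]
        · rw [if_neg htail, if_pos hhead]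
      · simp only [if_neg hhead]
        congr 1
        simp only [eq_iff_iff, List.mem_cons]
        constructor
        · rintro ⟨⟨j, hj, hq, hr2, hc2⟩, hb⟩
          exact ⟨⟨j, Or.inr hj, hq, hr2, hc2⟩, hb⟩
        · rintro ⟨⟨j, hj, hq, hr2, hc2⟩, hb⟩
          rcases hj with rfl | hj
          · exact absurd ⟨hr2, hc2, hb⟩ hhead
          · exact ⟨⟨j, hj, hq, hr2, hc2⟩, hb⟩
    · simp only [hp]
      simp only [Bool.false_eq_true, if_false]
      congr 1
      simp only [eq_iff_iff, List.mem_cons]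
      constructor
      · rintro ⟨⟨j, hj, hq, hr2, hc2⟩, hb⟩
        exact ⟨⟨j, Or.inr hj, hq, hr2, hc2⟩, hb⟩
      · rintro ⟨⟨j, hj, hq, hr2, hc2⟩, hb⟩
        rcases hj with rfl | hj
        · exact absurd hq (by simp [hp])
        · exact ⟨⟨j, hj, hq, hr2, hc2⟩, hb⟩


lemma copy_id (input : List (List Int)) : input.map (fun row => row.map (fun cell => cell)) = input := by
  simp

lemma getD_map_lt {α : Type} (input : List (List α)) (f : List α → List α) {r : Nat}
    (h : r < input.length) : (input.map f).getD r [] = f (input.getD r []) := by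
  rw [List.getD_eq_getElem _ _ (by simpa), List.getElem_map, List.getD_eq_getElem _ _ h]

lemma getD_map_len (input : List (List Int)) (f : List Int → List Int) (r : Nat)
    (h : ∀ row ∈ input, (f row).length = row.length) :
    ((input.map f).getD r []).length = (input.getD r []).length := by
  by_cases hr : r < input.length
  · rw [getD_map_lt input f hr]
    exact h _ (by rw [List.getD_eq_getElem _ _ hr]; exact List.getElem_mem hr)
  · rw [List.getD_eq_default _ _ (by simpa using Nat.le_of_not_lt hr),
        List.getD_eq_default _ _ (Nat.le_of_not_lt hr)]

lemma solve_eq (input : List (List Int)) :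
    solve input
      = ((List.range input.length).flatMap
           (fun r' => (List.range ((input.headD []).length)).map (fun c' => (r', c')))).foldl
          (fun o i => if pvCell input i.1 i.2 == 1 && pvIsPartOfLine input input.length ((input.headD []).length) i.1 i.2
                      then o.modify i.1 (fun row => row.set i.2 2) else o)
          (input.map (fun row => row.map (fun cell => cell))) := by
  rw [List.foldl_flatMap]
  simp only [List.foldl_map]
  rfl

lemma solve_alt_eq (input : List (List Int)) :
    solve_alt input
      = ((List.range ((input.headD []).length)).flatMap
           (fun c' => (List.range input.length).map (fun r' => (c', r')))).foldl
          (fun o i => if (pvMarkRuns (input.map (fun row => row.getD i.1 0))).getD i.2 0 == 2 && pvCell input i.2 i.1 == 1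
                      then o.modify i.2 (fun row => row.set i.1 2) else o)
          (input.map (fun row => pvMarkRuns (row.take ((input.headD []).length)) ++ row.drop ((input.headD []).length))) := by
  rw [List.foldl_flatMap]
  simp only [List.foldl_map]
  rfl

lemma solve_len (input : List (List Int)) : (solve input).length = input.length := by
  rw [solve_eq, (shape_foldl_writes _ _ _ _ _).1, copy_id]

lemma solve_rowlen (input : List (List Int)) (r : Nat) :
    ((solve input).getD r []).length = (input.getD r []).length := by
  rw [solve_eq, (shape_foldl_writes _ _ _ _ _).2 r, copy_id]

lemma solve_alt_len (input : List (List Int)) : (solve_alt input).length = input.length := by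
  rw [solve_alt_eq, (shape_foldl_writes _ _ _ _ _).1, List.length_map]

lemma solve_alt_rowlen (input : List (List Int))
    (hrow : ∀ row ∈ input, (input.headD []).length ≤ row.length) (r : Nat) :
    ((solve_alt input).getD r []).length = (input.getD r []).length := by
  rw [solve_alt_eq, (shape_foldl_writes _ _ _ _ _).2 r]
  refine getD_map_len _ _ _ (fun row hm => ?_)
  rw [List.length_append, pvMarkRuns_length, List.length_take, List.length_drop]
  have := hrow row hm
  omega

lemma solve_cell (input : List (List Int)) (r c : Nat) :
    pvCell (solve input) r c =
      if (r < input.length ∧ c < (input.headD []).length ∧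
            (pvCell input r c == 1 && pvIsPartOfLine input input.length ((input.headD []).length) r c) = true)
          ∧ c < (input.getD r []).length
      then 2 else pvCell input r c := by
  rw [solve_eq, cell_foldl_writes, copy_id]
  congr 1
  simp only [eq_iff_iff, List.mem_flatMap, List.mem_map, List.mem_range]
  constructor
  · rintro ⟨⟨i, ⟨r', hr', c', hc', rfl⟩, hq, h1, h2⟩, hb⟩
    simp only at h1 h2
    subst h1; subst h2
    exact ⟨⟨hr', hc', hq⟩, hb⟩
  · rintro ⟨⟨hr, hc, hq⟩, hb⟩
    exact ⟨⟨(r, c), ⟨r, hr, c, hc, rfl⟩, hq, rfl, rfl⟩, hb⟩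

lemma solve_alt_cell (input : List (List Int)) (r c : Nat) :
    pvCell (solve_alt input) r c =
      if (c < (input.headD []).length ∧ r < input.length ∧
            ((pvMarkRuns (input.map (fun row => row.getD c 0))).getD r 0 == 2 && pvCell input r c == 1) = true)
          ∧ c < ((input.map (fun row => pvMarkRuns (row.take ((input.headD []).length)) ++ row.drop ((input.headD []).length))).getD r []).length
      then 2
      else pvCell (input.map (fun row => pvMarkRuns (row.take ((input.headD []).length)) ++ row.drop ((input.headD []).length))) r c := by
  rw [solve_alt_eq, cell_foldl_writes]
  congr 1
  simp only [eq_iff_iff, List.mem_flatMap, List.mem_map, List.mem_range]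
  constructor
  · rintro ⟨⟨i, ⟨c', hc', r', hr', rfl⟩, hq, h1, h2⟩, hb⟩
    simp only at h1 h2
    subst h1; subst h2
    exact ⟨⟨hc', hr', hq⟩, hb⟩
  · rintro ⟨⟨hc, hr, hq⟩, hb⟩
    exact ⟨⟨(c, r), ⟨c, hc, r, hr, rfl⟩, hq, rfl, rfl⟩, hb⟩

-- ===== VERDICT (by name: the statement is the Claim_ definition above) =====
theorem solve_spec : Claim_equal_solve := by
  intro input hdom hpre
  unfold Spec_solve
  obtain ⟨hne, hrow⟩ := hpre
  have hrows1 : 1 ≤ input.length := List.length_pos_of_ne_nil hne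
  apply List.ext_getElem (by rw [solve_len, solve_alt_len])
  intro r h1 h2
  have hr : r < input.length := by rw [solve_len] at h1; exact h1
  apply List.ext_getElem
  · rw [← List.getD_eq_getElem _ [] h1, ← List.getD_eq_getElem _ [] h2,
        solve_rowlen, solve_alt_rowlen input hrow]
  intro c hc1 hc2
  have hcl : c < (input.getD r []).length := by
    rw [← List.getD_eq_getElem _ [] h1, solve_rowlen] at hc1
    exact hc1
  have e1 : (solve input)[r][c] = pvCell (solve input) r c := by
    rw [pvCell, List.getD_eq_getElem _ [] h1, List.getD_eq_getElem _ (0:Int) hc1]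
  have e2 : (solve_alt input)[r][c] = pvCell (solve_alt input) r c := by
    rw [pvCell, List.getD_eq_getElem _ [] h2, List.getD_eq_getElem _ (0:Int) hc2]
  rw [e1, e2, solve_cell, solve_alt_cell]
  -- abbreviations and facts
  have hrm : input.getD r [] ∈ input := by
    rw [List.getD_eq_getElem _ _ hr]; exact List.getElem_mem hr
  have hcle : (input.headD []).length ≤ (input.getD r []).length := hrow _ hrm
  set cols := (input.headD []).length with hcols
  set row := input.getD r [] with hrowdef
  have htake : (row.take cols).length = cols := by
    rw [List.length_take]; omega
  have hcolget : ∀ j, j < input.length →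
      (input.map (fun row => row.getD c 0)).getD j 0 = pvCell input j c := by
    intro j hj
    rw [List.getD_eq_getElem _ _ (by simpa), List.getElem_map, pvCell, List.getD_eq_getElem _ _ hj]
  -- characterize the horizontal triple
  have hH : pvTriple (row.take cols) c = true ↔
      (0 < c ∧ c + 1 < cols ∧ pvCell input r (c-1) = 1 ∧ pvCell input r c = 1 ∧ pvCell input r (c+1) = 1) := by
    rw [pvTriple_iff, htake]
    constructor
    · rintro ⟨h0, hb, hm1, hm, hp1⟩
      rw [getD_take_lt _ _ (by omega)] at hm1 hm hp1
      exact ⟨h0, hb, hm1, hm, hp1⟩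
    · rintro ⟨h0, hb, hm1, hm, hp1⟩
      refine ⟨h0, hb, ?_, ?_, ?_⟩ <;> rw [getD_take_lt _ _ (by omega)] <;> assumption
  -- characterize the vertical triple
  have hV : pvTriple (input.map (fun row => row.getD c 0)) r = true ↔
      (0 < r ∧ r + 1 < input.length ∧ pvCell input (r-1) c = 1 ∧ pvCell input r c = 1 ∧ pvCell input (r+1) c = 1) := by
    rw [pvTriple_iff, List.length_map]
    constructor
    · rintro ⟨h0, hb, hm1, hm, hp1⟩
      rw [hcolget _ (by omega)] at hm1 hm hp1
      exact ⟨h0, hb, hm1, hm, hp1⟩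
    · rintro ⟨h0, hb, hm1, hm, hp1⟩
      refine ⟨h0, hb, ?_, ?_, ?_⟩ <;> rw [hcolget _ (by omega)] <;> assumption
  -- A's per-cell condition
  have hAcond : (pvCell input r c == 1 && pvIsPartOfLine input input.length cols r c) = true ↔
      (pvCell input r c = 1 ∧
        ((0 < c ∧ c + 1 < cols ∧ pvCell input r (c-1) = 1 ∧ pvCell input r c = 1 ∧ pvCell input r (c+1) = 1)
          ∨ (0 < r ∧ r + 1 < input.length ∧ pvCell input (r-1) c = 1 ∧ pvCell input r c = 1 ∧ pvCell input (r+1) c = 1))) := by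
    simp only [pvIsPartOfLine, Bool.and_eq_true, Bool.or_eq_true, beq_iff_eq, decide_eq_true_eq]
    constructor
    · rintro ⟨hv1, h | h⟩
      · exact ⟨hv1, Or.inl ⟨h.1.1.1.1, by omega, h.1.1.2, h.1.2, h.2⟩⟩
      · exact ⟨hv1, Or.inr ⟨h.1.1.1.1, by omega, h.1.1.2, h.1.2, h.2⟩⟩
    · rintro ⟨hv1, h | h⟩
      · exact ⟨hv1, Or.inl ⟨⟨⟨⟨h.1, by omega⟩, h.2.2.1⟩, h.2.2.2.1⟩, h.2.2.2.2⟩⟩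
      · exact ⟨hv1, Or.inr ⟨⟨⟨⟨h.1, by omega⟩, h.2.2.1⟩, h.2.2.2.1⟩, h.2.2.2.2⟩⟩
  -- B's per-cell condition
  have hBcond : ((pvMarkRuns (input.map (fun row => row.getD c 0))).getD r 0 == 2 && pvCell input r c == 1) = true ↔
      (0 < r ∧ r + 1 < input.length ∧ pvCell input (r-1) c = 1 ∧ pvCell input r c = 1 ∧ pvCell input (r+1) c = 1) := by
    rw [Bool.and_eq_true, beq_iff_eq, beq_iff_eq, pvMarkRuns_getD]
    by_cases hVt : pvTriple (input.map (fun row => row.getD c 0)) r = true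
    · rw [if_pos hVt]
      have := hV.mp hVt
      constructor
      · intro _; exact this
      · intro h; exact ⟨rfl, this.2.2.2.1⟩
    · rw [if_neg hVt, hcolget _ hr]
      constructor
      · rintro ⟨h2, h1⟩; rw [h1] at h2; exact absurd h2 (by norm_num)
      · intro h; exact absurd (hV.mpr h) hVt
  -- B's value before the vertical pass
  have hout0 : pvCell (input.map (fun row => pvMarkRuns (row.take cols) ++ row.drop cols)) r c =
      if c < cols ∧ pvTriple (row.take cols) c = true then 2 else pvCell input r c := by
    rw [pvCell, getD_map_lt _ _ hr, ← hrowdef]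
    by_cases hc : c < cols
    · rw [List.getD_append _ _ _ _ (by rw [pvMarkRuns_length, htake]; exact hc), pvMarkRuns_getD]
      by_cases hT : pvTriple (row.take cols) c = true
      · rw [if_pos hT, if_pos ⟨hc, hT⟩]
      · rw [if_neg hT, if_neg (by tauto), getD_take_lt _ _ hc]
        rfl
    · rw [List.getD_append_right _ _ _ _ (by rw [pvMarkRuns_length, htake]; omega), pvMarkRuns_length, htake,
          getD_drop', if_neg (by tauto)]
      rw [pvCell, ← hrowdef]
      congr 1
      omega
  have hb0 : ((input.map (fun row => pvMarkRuns (row.take cols) ++ row.drop cols)).getD r []).length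
      = (input.getD r []).length := by
    refine getD_map_len _ _ _ (fun rw2 hm => ?_)
    rw [List.length_append, pvMarkRuns_length, List.length_take, List.length_drop]
    have := hrow rw2 hm
    omega
  rw [hout0, hb0]
  -- final case analysis
  by_cases hHP : (0 < c ∧ c + 1 < cols ∧ pvCell input r (c-1) = 1 ∧ pvCell input r c = 1 ∧ pvCell input r (c+1) = 1)
  · have hcc : c < cols := by omega
    by_cases hVP : (0 < r ∧ r + 1 < input.length ∧ pvCell input (r-1) c = 1 ∧ pvCell input r c = 1 ∧ pvCell input (r+1) c = 1)
    · rw [if_pos ⟨⟨hr, hcc, hAcond.mpr ⟨hHP.2.2.2.1, Or.inl hHP⟩⟩, hcl⟩,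
          if_pos ⟨⟨hcc, hr, hBcond.mpr hVP⟩, hcl⟩]
    · rw [if_pos ⟨⟨hr, hcc, hAcond.mpr ⟨hHP.2.2.2.1, Or.inl hHP⟩⟩, hcl⟩,
          if_neg (fun h => hVP (hBcond.mp h.1.2.2)),
          if_pos ⟨hcc, hH.mpr hHP⟩]
  · by_cases hVP : (0 < r ∧ r + 1 < input.length ∧ pvCell input (r-1) c = 1 ∧ pvCell input r c = 1 ∧ pvCell input (r+1) c = 1)
    · by_cases hcc : c < cols
      · rw [if_pos ⟨⟨hr, hcc, hAcond.mpr ⟨hVP.2.2.2.1, Or.inr hVP⟩⟩, hcl⟩,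
            if_pos ⟨⟨hcc, hr, hBcond.mpr hVP⟩, hcl⟩]
      · rw [if_neg (fun h => hcc h.1.2.1), if_neg (fun h => hcc h.1.1),
            if_neg (fun h => hcc h.1)]
    · rw [if_neg (fun h => (hAcond.mp h.1.2.2).2.elim hHP hVP),
          if_neg (fun h => hVP (hBcond.mp h.1.2.2)),
          if_neg (fun h => hHP (hH.mp h.2))]
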